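-- pv_equiv track=rewrite | github.com/xjdeng/sd_tools | filetools.py | get_most_common_folders
-- ===== SOURCE A (Python) =====
-- from collections import defaultdict, Counter
--
-- def find_and_add_substrings(s, t):
--     result = []
--     start = 0
--     while True:
--         index = s.find(t, start)
--         if index == -1:
--             break
--         result.append(s[:index + len(t)])
--         start = index + 1
--     return result
--
-- def get_most_common_folders(file_paths, N):
--     folder_counts = Counter()
--
--     # Count occurrences of each folder
--     for file_path in file_paths:
--         for folder in find_and_add_substrings(file_path, "/"):
--             folder_counts[folder] += 1
--
--     # Sort folders by counts in descending order
--     sorted_folders = sorted(folder_counts.items(), key=lambda x: x[1], reverse=True)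
--
--     # Select top N folders
--     most_common_folders = sorted_folders[:N]
--
--     return most_common_folders
-- ===== SOURCE B (Python) =====
-- from collections import Counter
--
-- def get_most_common_folders(file_paths, N):
--     counts = Counter()
--     for path in file_paths:
--         parts = path.split("/")
--         prefix = ""
--         for part in parts[:-1]:
--             prefix = prefix + part + "/"
--             counts[prefix] += 1
--     return sorted(counts.items(), key=lambda x: x[1], reverse=True)[:N]
-- ===== Notes on version B (the rewrite author's own statement) =====
-- stated objective: simpler
-- what changed: The find-based helper (repeated str.find scans restarting after each hit) is removed entirely; B splits each path on '/' once and emits the prefixes with a running accumulator over the components, keeping the Counter and the stable sort-by-count tail.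
import Mathlib
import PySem

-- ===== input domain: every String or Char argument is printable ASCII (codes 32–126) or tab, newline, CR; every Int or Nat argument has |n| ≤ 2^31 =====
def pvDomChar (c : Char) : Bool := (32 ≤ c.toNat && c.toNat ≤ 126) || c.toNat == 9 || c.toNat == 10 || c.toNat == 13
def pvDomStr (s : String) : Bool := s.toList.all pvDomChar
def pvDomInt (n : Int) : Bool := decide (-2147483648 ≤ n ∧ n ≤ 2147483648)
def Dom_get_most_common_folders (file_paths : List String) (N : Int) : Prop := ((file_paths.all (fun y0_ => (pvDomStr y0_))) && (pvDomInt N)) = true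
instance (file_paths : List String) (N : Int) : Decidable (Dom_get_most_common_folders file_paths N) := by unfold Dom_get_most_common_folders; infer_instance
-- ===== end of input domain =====

-- B replaces A's repeated str.find scans by a single split('/') per path with a running
-- prefix accumulator (objective: simpler decomposition; same emission order, same counts).

-- ===== PORT A =====
-- the while-loop of find_and_add_substrings; fuel = len(s)+2 always suffices since start strictly increases and stays ≤ len(s)+1
def faasGo (s t : String) (start : Int) : Nat → List String
  | 0 => []
  | fuel+1 =>
    let index := PySem.Str.findFrom s t start
    if index = -1 then []
    else PySem.Str.slice s none (some (index + PySem.Str.len t)) :: faasGo s t (index + 1) fuel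

def find_and_add_substrings (s t : String) : List String :=
  faasGo s t 0 (s.toList.length + 2)

def get_most_common_folders (file_paths : List String) (N : Int) : List (String × Int) :=
  let folder_counts : PySem.Dict String Int :=
    file_paths.foldl (fun counts file_path =>
      (find_and_add_substrings file_path "/").foldl
        (fun c folder => c.modify folder 0 (· + 1)) counts) PySem.Dict.empty
  let sorted_folders := PySem.List.sorted folder_counts.items (fun x => x.2) true
  PySem.List.slice sorted_folders none (some N)

-- ===== PORT B =====
def get_most_common_folders_alt (file_paths : List String) (N : Int) : List (String × Int) :=
  let counts : PySem.Dict String Int :=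
    file_paths.foldl (fun counts path =>
      let parts := ((PySem.Str.split? path "/").getD [])
      ((PySem.List.slice parts none (some (-1))).foldl
        (fun (st : String × PySem.Dict String Int) part =>
          let pre := st.1 ++ part ++ "/"
          (pre, st.2.modify pre 0 (· + 1))) ("", counts)).2) PySem.Dict.empty
  PySem.List.slice (PySem.List.sorted counts.items (fun x => x.2) true) none (some N)

-- ===== PRECONDITION & SPEC =====
def Spec_get_most_common_folders (file_paths : List String) (N : Int) (out : List (String × Int)) : Prop := out = get_most_common_folders_alt file_paths N
instance (file_paths : List String) (N : Int) (out : List (String × Int)) : Decidable (Spec_get_most_common_folders file_paths N out) := by unfold Spec_get_most_common_folders; infer_instance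

-- ===== CLAIM (what is proved, stated in full; the proofs are below) =====
def Claim_equal_get_most_common_folders : Prop := ∀ (file_paths : List String) (N : Int), Dom_get_most_common_folders file_paths N → Spec_get_most_common_folders file_paths N (get_most_common_folders file_paths N)

-- ===== LEMMAS AND PROOFS =====

-- canonical per-path prefix emission: one prefix per '/' character, shortest first
def pfx (acc : List Char) : List Char → List (List Char)
  | [] => []
  | c :: rest => if c = '/' then (acc ++ [c]) :: pfx (acc ++ [c]) rest else pfx (acc ++ [c]) rest

-- canonical split on '/'
def canon (cur : List Char) : List Char → List (List Char)
  | [] => [cur]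
  | c :: rest => if c = '/' then cur :: canon [] rest else canon (cur ++ [c]) rest

-- char-level running-prefix emission over split segments
def emitL (acc : List Char) : List (List Char) → List (List Char)
  | [] => []
  | p :: ps => (acc ++ p ++ ['/']) :: emitL (acc ++ p ++ ['/']) ps

-- string-level running-prefix emission (mirrors B's inner loop)
def emitS (pre : String) : List String → List String
  | [] => []
  | p :: ps => (pre ++ p ++ "/") :: emitS (pre ++ p ++ "/") ps

theorem canon_ne_nil (cur l : List Char) : canon cur l ≠ [] := by
  induction l generalizing cur with
  | nil => simp [canon]
  | cons c rest ih => simp only [canon]; split <;> simp [ih]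

theorem canon_spec (fuel : Nat) : ∀ (l cur : List Char) (acc : List (List Char)), l.length + 1 ≤ fuel →
    PySem.Chars.splitOn.go ['/'] fuel l cur acc = acc.reverse ++ canon cur.reverse l := by
  induction fuel with
  | zero => intro l cur acc h; omega
  | succ fuel ih =>
    intro l cur acc h
    match l with
    | [] => simp [PySem.Chars.splitOn.go, canon]
    | c :: rest =>
      simp only [PySem.Chars.splitOn.go]
      by_cases hc : c = '/'
      · subst hc
        have : List.isPrefixOf ['/'] ('/' :: rest) = true := by simp [List.isPrefixOf]
        simp only [this, if_pos, List.length_cons, List.length_nil, List.drop_succ_cons, List.drop_zero]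
        rw [ih rest [] (cur.reverse :: acc) (by simpa using Nat.le_of_succ_le_succ h)]
        simp [canon]
      · have : List.isPrefixOf ['/'] (c :: rest) = false := by
          simp [List.isPrefixOf]; exact fun hh => (hc hh.symm).elim
        simp only [this]
        rw [ih rest (c :: cur) acc (by simpa using Nat.le_of_succ_le_succ h)]
        simp [canon, hc]

theorem splitOn_eq_canon (l : List Char) : PySem.Chars.splitOn l ['/'] = canon [] l := by
  simpa using canon_spec (l.length + 1) l [] [] (by omega)

theorem emitL_canon (l : List Char) : ∀ (acc cur : List Char),
    emitL acc ((canon cur l).dropLast) = pfx (acc ++ cur) l := by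
  induction l with
  | nil => intro acc cur; simp [canon, pfx, emitL]
  | cons c rest ih =>
    intro acc cur
    by_cases hc : c = '/'
    · subst hc
      rw [show canon cur ('/' :: rest) = cur :: canon [] rest from by simp [canon],
          List.dropLast_cons_of_ne_nil (canon_ne_nil [] rest)]
      simp only [emitL, pfx]
      rw [ih (acc ++ cur ++ ['/']) []]
      simp
    · rw [show canon cur (c :: rest) = canon (cur ++ [c]) rest from by simp [canon, hc]]
      simp only [pfx, if_neg hc]
      rw [ih acc (cur ++ [c])]
      simp

theorem pfx_nil_of_no_slash (l : List Char) (h : '/' ∉ l) : ∀ acc, pfx acc l = [] := by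
  induction l with
  | nil => intro acc; simp [pfx]
  | cons c rest ih =>
    intro acc
    simp only [List.mem_cons, not_or] at h
    simp [pfx, Ne.symm h.1, ih h.2]

theorem pfx_step (j : Nat) : ∀ (l acc : List Char),
    (∀ i, i < j → l[i]? ≠ some '/') → l[j]? = some '/' →
    pfx acc l = (acc ++ l.take (j+1)) :: pfx (acc ++ l.take (j+1)) (l.drop (j+1)) := by
  induction j with
  | zero =>
    intro l acc _ hj
    match l with
    | c :: rest =>
      simp only [List.getElem?_cons_zero, Option.some.injEq] at hj
      subst hj
      simp [pfx]
  | succ j ih =>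
    intro l acc hlt hj
    match l with
    | [] => simp at hj
    | c :: rest =>
      have hc : c ≠ '/' := by
        have := hlt 0 (Nat.succ_pos j); simpa using this
      simp only [pfx, if_neg hc]
      rw [ih rest (acc ++ [c]) (fun i hi => by simpa using hlt (i+1) (by omega)) (by simpa using hj)]
      simp [List.take_succ_cons, List.drop_succ_cons]

theorem emitS_map (ps : List (List Char)) : ∀ (acc : List Char),
    emitS (String.ofList acc) (ps.map String.ofList) = (emitL acc ps).map String.ofList := by
  induction ps with
  | nil => intro acc; simp [emitS, emitL]
  | cons p ps ih =>
    intro acc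
    have hof : String.ofList acc ++ String.ofList p ++ "/" = String.ofList (acc ++ p ++ ['/']) := by
      simp [String.append_assoc]
    simp only [emitS, emitL, List.map_cons, hof, ih (acc ++ p ++ ['/'])]

theorem foldB_emitS (parts : List String) : ∀ (pre : String) (d : PySem.Dict String Int),
    (parts.foldl (fun (st : String × PySem.Dict String Int) part =>
        let pre := st.1 ++ part ++ "/"
        (pre, st.2.modify pre 0 (· + 1))) (pre, d)).2
      = (emitS pre parts).foldl (fun d k => d.modify k 0 (· + 1)) d := by
  induction parts with
  | nil => intro pre d; simp [emitS]
  | cons p ps ih => intro pre d; simp only [List.foldl_cons, emitS]; exact ih _ _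

theorem faas_spec (s : String) (fuel : Nat) : ∀ (k : Nat), k ≤ s.toList.length →
    s.toList.length - k + 1 ≤ fuel →
    faasGo s "/" (k : Int) fuel = (pfx (s.toList.take k) (s.toList.drop k)).map String.ofList := by
  induction fuel with
  | zero => intro k hk hf; omega
  | succ fuel ih =>
    intro k hk hf
    have htl : ("/" : String).toList = ['/'] := rfl
    simp only [faasGo, PySem.Str.findFrom_eq, htl]
    by_cases hneg : PySem.Chars.findFrom s.toList ['/'] (k : Int) none = -1
    · rw [if_pos hneg]
      have hnin : '/' ∉ s.toList.drop k := by
        have h2 := (PySem.Chars.findFrom_natCast_eq_neg_one_iff s.toList ['/'] k hk).mp hneg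
        intro hmem
        exact h2 ((List.singleton_infix_iff _ _).mpr hmem)
      rw [pfx_nil_of_no_slash _ hnin]
      simp
    · rw [if_neg hneg]
      obtain ⟨hge, hpre, hmin⟩ := PySem.Chars.findFrom_natCast_spec s.toList ['/'] k hk hneg
      set r := PySem.Chars.findFrom s.toList ['/'] (k:Int) none with hr
      have hkr : (k : Int) ≤ r := hge
      set j := r.toNat with hj
      have hrj : r = (j : Int) := by omega
      have hjk : k ≤ j := by omega
      have hsing : ∀ (m : Nat), (['/'] <+: s.toList.drop m) ↔ s.toList[m]? = some '/' := by
        intro m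
        constructor
        · rintro ⟨t, ht⟩
          have h0 : (s.toList.drop m)[0]? = some '/' := by rw [← ht]; rfl
          rw [List.getElem?_drop] at h0
          simpa using h0
        · intro hm
          have h0 : (s.toList.drop m)[0]? = some '/' := by rw [List.getElem?_drop]; simpa using hm
          match hd : s.toList.drop m with
          | [] => rw [hd] at h0; simp at h0
          | c :: t =>
            rw [hd] at h0
            simp only [List.getElem?_cons_zero, Option.some.injEq] at h0
            exact ⟨t, by subst h0; rfl⟩
      have hchar : s.toList[j]? = some '/' := (hsing j).mp (by rwa [hj])
      have hjlen : j < s.toList.length := by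
        have := List.getElem?_eq_some_iff.mp hchar
        exact this.1
      -- the emitted slice
      have hlen1 : PySem.Str.len "/" = (1 : Int) := rfl
      have hslice : PySem.Str.slice s none (some (r + PySem.Str.len "/"))
          = String.ofList (s.toList.take (j+1)) := by
        rw [hlen1, hrj]
        show String.ofList (PySem.Chars.slice s.toList none (some ((j:Int)+1))) = _
        rw [PySem.Chars.slice_eq_listSlice]
        rw [show ((j:Int)+1) = (((j+1 : Nat)) : Int) by push_cast; ring]
        rw [PySem.List.slice_to _ (by positivity)]
        simp
      rw [hslice, hrj]
      rw [show ((j:Int)+1) = (((j+1 : Nat)) : Int) by push_cast; ring]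
      rw [ih (j+1) (by omega) (by omega)]
      -- now the pfx side
      have hlt : ∀ i, i < j - k → (s.toList.drop k)[i]? ≠ some '/' := by
        intro i hi hcontra
        rw [List.getElem?_drop] at hcontra
        exact hmin (k+i) (by omega) (by omega) ((hsing (k+i)).mpr hcontra)
      have hjj : (s.toList.drop k)[j-k]? = some '/' := by
        rw [List.getElem?_drop, show k + (j-k) = j by omega]; exact hchar
      rw [pfx_step (j-k) (s.toList.drop k) (s.toList.take k) hlt hjj]
      rw [← List.take_add, List.drop_drop, show k + (j-k+1) = j+1 by omega]
      simp

theorem emitA_eq (s : String) :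
    find_and_add_substrings s "/" = (pfx [] s.toList).map String.ofList := by
  unfold find_and_add_substrings
  rw [show (0 : Int) = ((0 : Nat) : Int) from rfl]
  rw [faas_spec s (s.toList.length + 2) 0 (by omega) (by omega)]
  simp

theorem path_step_eq (path : String) (counts : PySem.Dict String Int) :
    ((PySem.List.slice ((PySem.Str.split? path "/").getD []) none (some (-1))).foldl
        (fun (st : String × PySem.Dict String Int) part =>
          let pre := st.1 ++ part ++ "/"
          (pre, st.2.modify pre 0 (· + 1))) ("", counts)).2
      = (find_and_add_substrings path "/").foldl
          (fun c folder => c.modify folder 0 (· + 1)) counts := by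
  have hsplit : (PySem.Str.split? path "/").getD [] = (canon [] path.toList).map String.ofList := by
    show (Option.map (List.map String.ofList) (PySem.Chars.split? path.toList ("/" : String).toList)).getD [] = _
    rw [show ("/" : String).toList = ['/'] from rfl]
    rw [show PySem.Chars.split? path.toList ['/'] = some (PySem.Chars.splitOn path.toList ['/']) from by
      simp [PySem.Chars.split?]]
    rw [splitOn_eq_canon]
    rfl
  rw [hsplit, PySem.List.slice_to_neg_one, ← List.map_dropLast, foldB_emitS,
      show ("" : String) = String.ofList [] from rfl, emitS_map, emitA_eq]
  rw [show emitL [] ((canon [] path.toList).dropLast) = pfx [] path.toList from by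
    simpa using emitL_canon path.toList [] []]

-- ===== VERDICT (by name: the statement is the Claim_ definition above) =====
theorem get_most_common_folders_spec : Claim_equal_get_most_common_folders := by
  intro file_paths N _
  unfold Spec_get_most_common_folders get_most_common_folders get_most_common_folders_alt
  have h : ∀ (counts : PySem.Dict String Int) (path : String),
      (find_and_add_substrings path "/").foldl
          (fun c folder => c.modify folder 0 (· + 1)) counts
        = ((PySem.List.slice ((PySem.Str.split? path "/").getD []) none (some (-1))).foldl
            (fun (st : String × PySem.Dict String Int) part =>
              let pre := st.1 ++ part ++ "/"
              (pre, st.2.modify pre 0 (· + 1))) ("", counts)).2 :=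
    fun counts path => (path_step_eq path counts).symm
  rw [List.foldl_ext _
    (fun counts path =>
      ((PySem.List.slice ((PySem.Str.split? path "/").getD []) none (some (-1))).foldl
            (fun (st : String × PySem.Dict String Int) part =>
              let pre := st.1 ++ part ++ "/"
              (pre, st.2.modify pre 0 (· + 1))) ("", counts)).2)
    PySem.Dict.empty (fun a x _ => h a x)]
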